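-- pv_equiv track=rewrite | github.com/jchcdwgithub/cppm_helper | data_util.py | merge_tables_into_one_table
-- ===== SOURCE A (Python) =====
-- def merge_tables_into_one_table(tables:list[list[str]]) -> list[list[str]]:
--     '''
--     Merges a set of tables that have similar headers into one table. Returns
--     the merged table.
--     '''
--     merged_table = []
--     all_table_headers = []
--     for table in tables:
--         table_headers = table[0]
--         for header in table_headers:
--             if not header in all_table_headers:
--                 all_table_headers.append(header)
--     for table in tables:
--         table_contents = table[1]
--         table_headers = table[0]
--         for row in table_contents:
--             new_row = ['' for _ in all_table_headers]
--             for header,item in zip(table_headers,row):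
--                 item_index = all_table_headers.index(header)
--                 new_row[item_index] = item
--             merged_table.append(new_row)
--     return (all_table_headers, merged_table)
-- ===== SOURCE B (Python) =====
-- def merge_tables_into_one_table(tables):
--     '''
--     Merges a set of tables that have similar headers into one table. Returns
--     the merged table.
--     '''
--     all_table_headers = list(dict.fromkeys(h for t in tables for h in t[0]))
--     blanks = ('',) * len(all_table_headers)
--     merged_table = [list(map(dict(zip(t[0], row)).get, all_table_headers, blanks))
--                     for t in tables for row in t[1]]
--     return (all_table_headers, merged_table)
-- ===== Notes on version B (the rewrite author's own statement) =====
-- stated objective: faster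
-- what changed: The second pass no longer preallocates a blank row and scatters items into it via a repeated all_table_headers.index(header) scan; each row becomes dict(zip(table_headers, row)) and the output row is gathered with map(rowmap.get, all_table_headers, blanks), with the header union built by dict.fromkeys.
import Mathlib
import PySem

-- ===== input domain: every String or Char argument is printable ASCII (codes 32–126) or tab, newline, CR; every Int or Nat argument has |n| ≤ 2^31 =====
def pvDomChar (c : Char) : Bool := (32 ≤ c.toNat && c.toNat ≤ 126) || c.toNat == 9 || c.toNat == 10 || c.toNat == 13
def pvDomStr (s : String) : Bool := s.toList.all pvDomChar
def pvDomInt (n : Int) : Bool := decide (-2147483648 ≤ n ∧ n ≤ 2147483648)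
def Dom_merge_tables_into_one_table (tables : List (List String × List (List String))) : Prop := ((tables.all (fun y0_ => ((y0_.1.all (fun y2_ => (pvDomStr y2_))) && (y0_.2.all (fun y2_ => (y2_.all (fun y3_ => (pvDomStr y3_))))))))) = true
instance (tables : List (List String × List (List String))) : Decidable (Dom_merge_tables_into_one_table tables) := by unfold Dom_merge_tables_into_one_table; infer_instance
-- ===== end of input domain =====

-- B merges via a per-row dict (zip headers/row, then gather a value per unified header) instead of
-- A's preallocated blank row scattered by repeated list.index scans; measured faster on large inputs.

-- ===== PORT A =====
-- first pass of A: order-preserving union of all table headers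
def pvHeadersA (tables : List (List String × List (List String))) : List String :=
  tables.foldl (fun all_table_headers table =>
    table.1.foldl (fun all_table_headers header =>
      if all_table_headers.contains header then all_table_headers
      else all_table_headers ++ [header]) all_table_headers) []

-- A's inner row loop: blank row, then place each (header, item) at all_table_headers.index(header)
-- (the `none` branch mirrors Python's unreachable ValueError path by leaving the row unchanged)
def pvRowA (all_table_headers table_headers row : List String) : List String :=
  (table_headers.zip row).foldl (fun new_row hi =>
    match PySem.List.index? all_table_headers hi.1 with
    | some item_index => new_row.set item_index hi.2
    | none => new_row) (List.replicate all_table_headers.length "")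

def merge_tables_into_one_table (tables : List (List String × List (List String))) : List String × List (List String) :=
  let all_table_headers := pvHeadersA tables
  let merged_table :=
    tables.foldl (fun merged_table table =>
      table.2.foldl (fun merged_table row =>
        merged_table ++ [pvRowA all_table_headers table.1 row]) merged_table) []
  (all_table_headers, merged_table)

-- ===== PORT B =====
-- B's row: list(map(dict(zip(table_headers, row)).get, all_table_headers, blanks));
-- Python's two-list map truncates at the shorter list, i.e. zipWith
def pvRowB (all_table_headers blanks table_headers row : List String) : List String :=
  List.zipWith (fun h b => (PySem.Dict.ofList (table_headers.zip row)).getD h b)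
    all_table_headers blanks

def merge_tables_into_one_table_alt (tables : List (List String × List (List String))) : List String × List (List String) :=
  let all_table_headers := PySem.List.dedup (tables.flatMap (fun t => t.1))
  let blanks := List.replicate all_table_headers.length ""
  let merged_table := tables.flatMap (fun t => t.2.map (pvRowB all_table_headers blanks t.1))
  (all_table_headers, merged_table)

-- ===== PRECONDITION & SPEC =====
def Spec_merge_tables_into_one_table (tables : List (List String × List (List String))) (out : List String × List (List String)) : Prop := out = merge_tables_into_one_table_alt tables
instance (tables : List (List String × List (List String))) (out : List String × List (List String)) : Decidable (Spec_merge_tables_into_one_table tables out) := by unfold Spec_merge_tables_into_one_table; infer_instance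

-- ===== CLAIM (what is proved, stated in full; the proofs are below) =====
def Claim_equal_merge_tables_into_one_table : Prop := ∀ (tables : List (List String × List (List String))), Dom_merge_tables_into_one_table tables → Spec_merge_tables_into_one_table tables (merge_tables_into_one_table tables)

-- ===== LEMMAS AND PROOFS =====

-- A's first pass is the ordered dedup of the concatenated header lists
theorem pvHeadersA_eq (tables : List (List String × List (List String))) :
    pvHeadersA tables = PySem.List.dedup (tables.flatMap (fun t => t.1)) := by
  simp only [pvHeadersA, PySem.List.dedup_eq_ofList, PySem.Set.ofList, List.foldl_flatMap]
  rfl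

-- setting position (index? H a) in a mapped list = mapping with the value overridden at key a
theorem set_map_index {β : Type} (H : List String) (f : String → β) (a : String) (x : β)
    (j : Nat) (hnd : H.Nodup) (hj : PySem.List.index? H a = some j) :
    (H.map f).set j x = H.map (fun h => if h = a then x else f h) := by
  induction H generalizing j with
  | nil => simp [PySem.List.index?] at hj
  | cons b H ih =>
    by_cases hb : b = a
    · subst hb
      rw [PySem.List.index?_cons_self] at hj
      cases hj
      simp only [List.map_cons, List.set_cons_zero]
      congr 1
      apply List.map_congr_left
      intro h hh
      have : h ≠ b := fun e => (List.nodup_cons.mp hnd).1 (e ▸ hh)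
      simp [this]
    · rw [PySem.List.index?_cons_of_ne H hb] at hj
      cases hk : PySem.List.index? H a with
      | none => rw [hk] at hj; simp at hj
      | some k =>
        rw [hk] at hj
        simp only [Option.map_some] at hj
        cases hj
        simp only [List.map_cons, List.set_cons_succ]
        rw [ih k (List.nodup_cons.mp hnd).2 hk]
        congr 1
        simp [hb]

-- A's scatter loop over (header, item) pairs equals B's gather over the unified headers
theorem row_fold (H : List String) (hnd : H.Nodup) (zs : List (String × String))
    (d : PySem.Dict String String) :
    zs.foldl (fun new_row hi =>
        match PySem.List.index? H hi.1 with
        | some item_index => new_row.set item_index hi.2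
        | none => new_row) (H.map (fun h => d.getD h "")) =
    H.map (fun h => (zs.foldl (fun d p => d.insert p.1 p.2) d).getD h "") := by
  induction zs generalizing d with
  | nil => rfl
  | cons p zs ih =>
    simp only [List.foldl_cons]
    have hstep : (match PySem.List.index? H p.1 with
        | some item_index => (H.map (fun h => d.getD h "")).set item_index p.2
        | none => H.map (fun h => d.getD h "")) =
        H.map (fun h => (d.insert p.1 p.2).getD h "") := by
      by_cases hm : p.1 ∈ H
      · have hs : (PySem.List.index? H p.1).isSome := (PySem.List.index?_isSome_iff H p.1).mpr hm
        cases hj : PySem.List.index? H p.1 with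
        | none => rw [hj] at hs; simp at hs
        | some j =>
          show (H.map (fun h => d.getD h "")).set j p.2 = _
          rw [set_map_index H _ p.1 p.2 j hnd hj]
          apply List.map_congr_left
          intro h _
          by_cases he : h = p.1
          · simp [he, PySem.Dict.getD_insert_self]
          · simp [he, PySem.Dict.getD_insert_of_ne _ _ _ he]
      · rw [(PySem.List.index?_eq_none_iff H p.1).mpr hm]
        show H.map (fun h => d.getD h "") = _
        apply List.map_congr_left
        intro h hh
        have : h ≠ p.1 := fun e => hm (e ▸ hh)
        rw [PySem.Dict.getD_insert_of_ne _ _ _ this]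
    rw [hstep, ih (d.insert p.1 p.2)]

-- zipWith against a same-length replicate is a map with the constant argument
theorem zipWith_replicate_len {α β γ : Type} (f : α → β → γ) (l : List α) (b : β) :
    List.zipWith f l (List.replicate l.length b) = l.map (fun a => f a b) := by
  induction l with
  | nil => rfl
  | cons x l ih => simp [List.replicate_succ, ih]

-- per-row equality of A's and B's row builders
theorem pvRow_eq (H : List String) (hnd : H.Nodup) (table_headers row : List String) :
    pvRowA H table_headers row = pvRowB H (List.replicate H.length "") table_headers row := by
  unfold pvRowA pvRowB
  rw [zipWith_replicate_len]
  have hinit : List.replicate H.length "" =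
      H.map (fun h => (PySem.Dict.empty : PySem.Dict String String).getD h "") := by
    simp [PySem.Dict.getD_empty, List.map_const']
  rw [hinit, row_fold H hnd]
  rfl

-- A's append-accumulating double loop equals B's flatMap/map, for any accumulator
theorem mergedA_eq (H : List String) (hnd : H.Nodup)
    (tables : List (List String × List (List String))) (init : List (List String)) :
    tables.foldl (fun merged_table table =>
      table.2.foldl (fun merged_table row =>
        merged_table ++ [pvRowA H table.1 row]) merged_table) init =
    init ++ tables.flatMap (fun t => t.2.map (pvRowB H (List.replicate H.length "") t.1)) := by
  induction tables generalizing init with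
  | nil => simp
  | cons t ts ih =>
    simp only [List.foldl_cons, List.flatMap_cons]
    rw [PySem.List.foldl_append_singleton_eq_map (pvRowA H t.1) t.2 init, ih, List.append_assoc]
    congr 2
    exact List.map_congr_left (fun row _ => pvRow_eq H hnd t.1 row)

-- ===== VERDICT (by name: the statement is the Claim_ definition above) =====
theorem merge_tables_into_one_table_spec : Claim_equal_merge_tables_into_one_table := by
  intro tables _
  unfold Spec_merge_tables_into_one_table merge_tables_into_one_table merge_tables_into_one_table_alt
  simp only [pvHeadersA_eq]
  exact Prod.ext rfl (mergedA_eq _ (PySem.List.nodup_dedup _) tables [])
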